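-- pv_equiv track=rewrite | github.com/enp-china/CCSR-NER | src/utils/trainer_utils.py | makeFormatGold
-- ===== SOURCE A (Python) =====
-- def makeFormatGold(sentence: str):
--     split_str = sentence.split()
--     list_tok = []
--     for token in split_str:
--         if len(token) == 1:
--             tok = token + "-_-S"
--             list_tok.append(tok)
--         elif len(token) > 1:
--             tok = token[0] + "-_" + token[1:] + "-B"
--             list_tok.append(tok)
--             for i in range(1, len(token) - 1):
--                 tok = token[i] + "-" + token[:i] + "_" + token[i + 1 :] + "-I"
--                 list_tok.append(tok)
--             tok = token[-1] + "-" + token[:-1] + "_-E"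
--             list_tok.append(tok)
--     return list_tok
-- ===== SOURCE B (Python) =====
-- def makeFormatGold(sentence: str):
--     list_tok = []
--     for token in sentence.split():
--         n = len(token)
--         tags = "S" if n == 1 else "B" + "I" * (n - 2) + "E"
--         left, right = "", token
--         for tag in tags:
--             ch, right = right[0], right[1:]
--             list_tok.append(ch + "-" + left + "_" + right + "-" + tag)
--             left += ch
--     return list_tok
-- ===== Notes on version B (the rewrite author's own statement) =====
-- stated objective: alternative
-- what changed: B precomputes each token's whole BIES tag sequence up front (singleton tag, or begin + middles + end) and then walks the token once with incrementally maintained left/right accumulator strings, with no index-based slicing and no per-position conditionals, where A has four special-cased blocks driven by index slices.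
import Mathlib
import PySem

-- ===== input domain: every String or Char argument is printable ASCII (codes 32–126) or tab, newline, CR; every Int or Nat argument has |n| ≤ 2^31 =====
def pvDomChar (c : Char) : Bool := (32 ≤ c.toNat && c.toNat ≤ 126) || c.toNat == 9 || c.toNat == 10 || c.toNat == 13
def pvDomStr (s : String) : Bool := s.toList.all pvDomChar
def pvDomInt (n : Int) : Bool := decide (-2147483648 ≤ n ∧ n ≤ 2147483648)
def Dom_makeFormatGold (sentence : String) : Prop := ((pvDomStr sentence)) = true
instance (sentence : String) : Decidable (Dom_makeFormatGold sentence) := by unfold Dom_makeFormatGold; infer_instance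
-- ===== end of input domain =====

-- B precomputes each token's whole BIES tag string and walks the token with incrementally
-- maintained left/right strings, replacing A's four slice-indexed blocks (objective: alternative).

-- ===== PORT A =====
-- per-token block of A: append the B/S line, the inner I-loop, then the E line
def mfgTokenA (acc : List String) (tokenS : String) : List String :=
  let token := tokenS.toList
  if token.length = 1 then
    acc ++ [String.ofList (token ++ ['-', '_', '-', 'S'])]
  else if token.length > 1 then
    ((PySem.List.pyRange 1 ((token.length : Int) - 1) 1).foldl (fun acc i =>
        acc ++ [String.ofList ([PySem.List.pyGetD token i ' '] ++ ['-'] ++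
          PySem.List.slice token none (some i) ++ ['_'] ++
          PySem.List.slice token (some (i + 1)) none ++ ['-', 'I'])])
      (acc ++ [String.ofList ([PySem.List.pyGetD token 0 ' '] ++ ['-', '_'] ++
        PySem.List.slice token (some 1) none ++ ['-', 'B'])]))
    ++ [String.ofList ([PySem.List.pyGetD token (-1) ' '] ++ ['-'] ++
      PySem.List.slice token none (some (-1)) ++ ['_', '-', 'E'])]
  else acc

def makeFormatGold (sentence : String) : List String :=
  (PySem.Str.split₀ sentence).foldl mfgTokenA []

-- ===== PORT B =====
-- tags = "S" if n == 1 else "B" + "I" * (n - 2) + "E"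
def mfgTags (n : Nat) : List Char :=
  if n = 1 then ['S'] else ['B'] ++ List.replicate (n - 2) 'I' ++ ['E']

-- the inner 'for tag in tags' loop: pop the head of right, emit the line, push it onto left
def mfgLoopB (out : List String) (left right tags : List Char) : List String :=
  match tags, right with
  | t :: ts, c :: rest =>
      mfgLoopB (out ++ [String.ofList ([c, '-'] ++ left ++ ['_'] ++ rest ++ ['-', t])])
        (left ++ [c]) rest ts
  | _, _ => out

def makeFormatGold_alt (sentence : String) : List String :=
  (PySem.Str.split₀ sentence).foldl (fun out tokenS =>
    mfgLoopB out [] tokenS.toList (mfgTags tokenS.toList.length)) []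

-- ===== PRECONDITION & SPEC =====
def Spec_makeFormatGold (sentence : String) (out : List String) : Prop := out = makeFormatGold_alt sentence
instance (sentence : String) (out : List String) : Decidable (Spec_makeFormatGold sentence out) := by unfold Spec_makeFormatGold; infer_instance

-- ===== CLAIM (what is proved, stated in full; the proofs are below) =====
def Claim_equal_makeFormatGold : Prop := ∀ (sentence : String), Dom_makeFormatGold sentence → Spec_makeFormatGold sentence (makeFormatGold sentence)

-- ===== LEMMAS AND PROOFS =====

-- common normal form: the line at position k, and the tag at position k
def mfgTagAt (n k : Nat) : Char :=
  if n = 1 then 'S' else if k = 0 then 'B' else if k = n - 1 then 'E' else 'I'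

def mfgLine (t : List Char) (k : Nat) : String :=
  String.ofList ([t.getD k ' ', '-'] ++ t.take k ++ ['_'] ++ t.drop (k + 1) ++ ['-', mfgTagAt t.length k])

lemma mfgTags_length (n : Nat) (h : 1 ≤ n) : (mfgTags n).length = n := by
  unfold mfgTags; split <;> simp <;> omega

lemma mfgTags_getElem (n k : Nat) (h : k < n) (hl : k < (mfgTags n).length) :
    (mfgTags n)[k] = mfgTagAt n k := by
  unfold mfgTags mfgTagAt
  by_cases h1 : n = 1
  · subst h1; interval_cases k; rfl
  · simp only [if_neg h1]
    rcases k with _ | k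
    · rfl
    · have h2 : 2 ≤ n := by omega
      simp only [List.cons_append, List.getElem_cons_succ]
      by_cases hk : k < n - 2
      · rw [List.getElem_append_left (by simpa using hk)]
        simp [List.getElem_replicate]
        omega
      · have hke : k = n - 2 := by
          have := mfgTags_length n (by omega)
          unfold mfgTags at this
          simp only [if_neg h1] at this
          simp at this ⊢
          omega
        subst hke
        rw [List.getElem_append_right (by simp)]
        simp
        omega

lemma mfgTags_drop (n k : Nat) (h : k < n) :
    (mfgTags n).drop k = mfgTagAt n k :: (mfgTags n).drop (k + 1) := by
  have hl : k < (mfgTags n).length := by rw [mfgTags_length n (by omega)]; exact h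
  rw [List.drop_eq_getElem_cons hl, mfgTags_getElem n k h hl]

-- B-side invariant: after k steps, left = take k, right = drop k, tags suffix = drop k
lemma mfgLoopB_inv (t : List Char) :
    ∀ (m k : Nat), k + m = t.length → ∀ (out : List String),
    mfgLoopB out (t.take k) (t.drop k) ((mfgTags t.length).drop k)
      = out ++ (List.range' k m).map (mfgLine t) := by
  intro m
  induction m with
  | zero =>
      intro k hk out
      have hd : t.drop k = [] := by rw [List.drop_eq_nil_iff]; omega
      rw [hd]
      cases (mfgTags t.length).drop k <;> simp [mfgLoopB]
  | succ m ih =>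
      intro k hk out
      have hkl : k < t.length := by omega
      rw [List.drop_eq_getElem_cons hkl, mfgTags_drop t.length k hkl]
      show mfgLoopB (out ++ [String.ofList ([t[k], '-'] ++ t.take k ++ ['_'] ++ t.drop (k + 1) ++ ['-', mfgTagAt t.length k])]) (t.take k ++ [t[k]]) (t.drop (k + 1)) ((mfgTags t.length).drop (k + 1)) = out ++ (List.range' k (m + 1)).map (mfgLine t)
      have ht : t.take k ++ [t[k]] = t.take (k + 1) := by
        rw [List.take_add_one, List.getElem?_eq_getElem hkl]; rfl
      rw [ht, ih (k + 1) (by omega)]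
      rw [List.range'_succ]
      simp [mfgLine, List.getElem?_eq_getElem hkl]

lemma mfgTokenB_eq (out : List String) (t : List Char) :
    mfgLoopB out [] t (mfgTags t.length) = out ++ (List.range' 0 t.length).map (mfgLine t) := by
  have := mfgLoopB_inv t t.length 0 (by omega) out
  simpa using this

-- A-side: the per-token block equals the same map of mfgLine over all positions
lemma mfgLineA_mid (t : List Char) (k : Nat) (hk : 1 ≤ k) (hkl : k < t.length - 1) :
    String.ofList ([PySem.List.pyGetD t (k : Int) ' '] ++ ['-'] ++
      PySem.List.slice t none (some (k : Int)) ++ ['_'] ++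
      PySem.List.slice t (some ((k : Int) + 1)) none ++ ['-', 'I']) = mfgLine t k := by
  have hc : ((k : Int) + 1) = ((k + 1 : Nat) : Int) := by push_cast; ring
  rw [PySem.List.pyGetD_natCast, PySem.List.slice_to_natCast, hc, PySem.List.slice_from_natCast]
  unfold mfgLine mfgTagAt
  have h1 : t.length ≠ 1 := by omega
  have h0 : k ≠ 0 := by omega
  have hl : k ≠ t.length - 1 := by omega
  simp [h1, h0, hl]

lemma mfgTokenA_eq (acc : List String) (tokenS : String) :
    mfgTokenA acc tokenS = acc ++ (List.range' 0 tokenS.toList.length).map (mfgLine tokenS.toList) := by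
  unfold mfgTokenA
  generalize tokenS.toList = t
  rcases t with _ | ⟨c, _ | ⟨d, r⟩⟩
  · simp
  · simp [mfgLine, mfgTagAt, List.range'_succ]
  · set t := c :: d :: r with ht
    have h2 : 2 ≤ t.length := by simp [ht]
    have hne : t ≠ [] := by simp [ht]
    have hlen1 : ¬ (t.length = 1) := by omega
    have hlen2 : t.length > 1 := by omega
    rw [if_neg hlen1, if_pos hlen2]
    rw [PySem.List.foldl_append_singleton_eq_map]
    -- split range' 0 n into 0, middle, n-1
    have hsplit : List.range' 0 t.length = 0 :: (List.range' 1 (t.length - 2) ++ [t.length - 1]) := by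
      obtain ⟨m, hm⟩ : ∃ m, t.length = m + 2 := ⟨t.length - 2, by omega⟩
      rw [hm]
      show List.range' 0 (m + 1 + 1) = 0 :: (List.range' 1 (m + 2 - 2) ++ [m + 2 - 1])
      rw [List.range'_succ, List.range'_1_concat]
      simp [Nat.add_comm]
    rw [hsplit]
    simp only [List.map_append, List.map_cons, List.map_nil]
    -- head line
    have hB : String.ofList ([PySem.List.pyGetD t 0 ' '] ++ ['-', '_'] ++
        PySem.List.slice t (some 1) none ++ ['-', 'B']) = mfgLine t 0 := by
      have h0 : PySem.List.pyGetD t (0 : Int) ' ' = t.getD 0 ' ' := by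
        have := PySem.List.pyGetD_natCast t 0 ' '
        simpa using this
      have hs : PySem.List.slice t (some (1 : Int)) none = t.drop 1 := by
        have := PySem.List.slice_from_natCast t 1
        simpa using this
      rw [h0, hs]
      unfold mfgLine mfgTagAt
      simp [hlen1]
    -- last line
    have hE : String.ofList ([PySem.List.pyGetD t (-1) ' '] ++ ['-'] ++
        PySem.List.slice t none (some (-1)) ++ ['_', '-', 'E']) = mfgLine t (t.length - 1) := by
      rw [PySem.List.pyGetD_neg_one t ' ' hne, PySem.List.slice_to_neg_one]
      unfold mfgLine mfgTagAt
      have hg : t[t.length - 1]?.getD ' ' = t.getLast hne := by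
        rw [List.getElem?_eq_getElem (by omega), Option.getD_some, List.getLast_eq_getElem]
      have htk : t.take (t.length - 1) = t.dropLast := by rw [List.dropLast_eq_take]
      have hdr : t.drop (t.length - 1 + 1) = [] := by rw [List.drop_eq_nil_iff]; omega
      have h0 : t.length - 1 ≠ 0 := by omega
      simp [hg, htk, hdr, hlen1, h0]
    -- middle lines
    have hmid : (PySem.List.pyRange 1 ((t.length : Int) - 1) 1).map (fun i =>
        String.ofList ([PySem.List.pyGetD t i ' '] ++ ['-'] ++
          PySem.List.slice t none (some i) ++ ['_'] ++
          PySem.List.slice t (some (i + 1)) none ++ ['-', 'I']))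
        = (List.range' 1 (t.length - 2)).map (mfgLine t) := by
      have hr : PySem.List.pyRange 1 ((t.length : Int) - 1) 1
          = (List.range' 1 (t.length - 2)).map Int.ofNat := by
        rw [PySem.List.pyRange_one]
        have hn : (((t.length : Int) - 1) - 1).toNat = t.length - 2 := by omega
        rw [hn, List.range'_eq_map_range, List.map_map]
        apply List.map_congr_left
        intro k _
        simp only [Function.comp_apply, Int.ofNat_eq_natCast]
        push_cast
        ring
      rw [hr, List.map_map]
      apply List.map_congr_left
      intro k hkmem
      rw [List.mem_range'_1] at hkmem
      simp only [Function.comp_apply]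
      exact mfgLineA_mid t k hkmem.1 (by omega)
    rw [hmid, hB, hE]
    simp

theorem mfg_eq (sentence : String) : makeFormatGold sentence = makeFormatGold_alt sentence := by
  unfold makeFormatGold makeFormatGold_alt
  generalize PySem.Str.split₀ sentence = toks
  induction toks using List.reverseRecOn with
  | nil => rfl
  | append_singleton ts t ih =>
      simp only [List.foldl_append, List.foldl_cons, List.foldl_nil, ih,
        mfgTokenA_eq, mfgTokenB_eq]

-- ===== VERDICT (by name: the statement is the Claim_ definition above) =====
theorem makeFormatGold_spec : Claim_equal_makeFormatGold := by
  intro s _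
  unfold Spec_makeFormatGold
  exact mfg_eq s
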